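-- pv_equiv track=rewrite | github.com/olifirovai/algorithm_course | Sprint 13, Topic 1. Greedy Algorithms/I. Equal Sum Subarrays.py | find_equal_sum
-- ===== SOURCE A (Python) =====
-- def find_equal_sum(arr, n):
--     left_sum = 0
--     right_sum = 0
--     sum_all = 0
--     arr.sort()
--     for i in range(0, n):
--         sum_all += arr[i]
--     if n > 1 and (sum_all % 2) == 0:
--         for i in range(0, n):
--             left_sum += arr[i]
--
--         for i in range(n - 1, -1, -1):
--             right_sum += arr[i]
--             left_sum -= arr[i]
--
--             if (right_sum == left_sum):
--                 return True
--     return False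
-- ===== SOURCE B (Python) =====
-- def find_equal_sum(arr, n):
--     arr.sort()
--     total = sum(arr[:n])
--     return n > 1 and total % 2 == 0 and any(2 * sum(arr[:k]) == total for k in range(n))
-- ===== Notes on version B (the rewrite author's own statement) =====
-- stated objective: alternative
-- what changed: B replaces A's three accumulator loops (full sum, full left_sum, descending dual-accumulator scan with early return) with a declarative definition: each candidate prefix sum is recomputed from scratch with sum(arr[:k]) and tested via any(), so no running accumulator or mutable loop state exists at all; this trades A's linear scans for a quadratic but direct restatement of the specification.
import Mathlib
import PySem

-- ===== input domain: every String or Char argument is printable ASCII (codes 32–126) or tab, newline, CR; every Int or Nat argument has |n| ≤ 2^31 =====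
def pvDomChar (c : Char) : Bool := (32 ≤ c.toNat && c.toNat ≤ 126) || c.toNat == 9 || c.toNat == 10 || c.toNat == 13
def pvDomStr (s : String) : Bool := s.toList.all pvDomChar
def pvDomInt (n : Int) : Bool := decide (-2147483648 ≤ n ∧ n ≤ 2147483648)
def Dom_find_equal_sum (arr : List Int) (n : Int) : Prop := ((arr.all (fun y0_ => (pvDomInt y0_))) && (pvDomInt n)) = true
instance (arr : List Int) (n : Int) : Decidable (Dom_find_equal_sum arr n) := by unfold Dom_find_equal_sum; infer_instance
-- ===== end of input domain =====

-- B replaces A's three accumulator loops by a declarative any() over prefix sums recomputed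
-- from scratch (objective: alternative; B is quadratic where A scans linearly).
-- Both A and B sort `arr` in place in Python; the equivalence proved here is about the return value.

-- ===== PORT A =====
-- A's descending loop `for i in range(n-1, -1, -1)` with early return on right_sum == left_sum
def pvLoopA (arr2 : List Int) (idxs : List Int) (right left : Int) : Bool :=
  match idxs with
  | [] => false
  | i :: rest =>
    let v := PySem.List.pyGetD arr2 i 0
    let right' := right + v
    let left' := left - v
    if right' = left' then true else pvLoopA arr2 rest right' left'

def find_equal_sum (arr : List Int) (n : Int) : Bool :=
  let arr2 := PySem.List.sorted arr (fun x => x) false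
  let sum_all := (PySem.List.pyRange 0 n 1).foldl (fun s i => s + PySem.List.pyGetD arr2 i 0) 0
  if n > 1 ∧ PySem.Int.mod sum_all 2 = 0 then
    let left_sum := (PySem.List.pyRange 0 n 1).foldl (fun s i => s + PySem.List.pyGetD arr2 i 0) 0
    pvLoopA arr2 (PySem.List.pyRange (n - 1) (-1) (-1)) 0 left_sum
  else false

-- ===== PORT B =====
-- B: `n > 1 and total % 2 == 0 and any(2 * sum(arr[:k]) == total for k in range(n))`
def find_equal_sum_alt (arr : List Int) (n : Int) : Bool :=
  let arr2 := PySem.List.sorted arr (fun x => x) false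
  let total := (PySem.List.slice arr2 none (some n)).sum
  decide (n > 1) && decide (PySem.Int.mod total 2 = 0) &&
    (PySem.List.pyRange 0 n 1).any
      (fun k => 2 * (PySem.List.slice arr2 none (some k)).sum == total)

-- ===== PRECONDITION & SPEC =====
-- A indexes arr[i] for i in range(n): it raises IndexError exactly when n > len(arr).
def Pre_find_equal_sum (arr : List Int) (n : Int) : Prop := n ≤ (arr.length : Int)
instance (arr : List Int) (n : Int) : Decidable (Pre_find_equal_sum arr n) := by
  unfold Pre_find_equal_sum; infer_instance

def pvWitness_find_equal_sum : List Int × Int := ([2, 1, 1], 3)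

def Spec_find_equal_sum (arr : List Int) (n : Int) (out : Bool) : Prop := out = find_equal_sum_alt arr n
instance (arr : List Int) (n : Int) (out : Bool) : Decidable (Spec_find_equal_sum arr n out) := by unfold Spec_find_equal_sum; infer_instance

-- ===== CLAIM (what is proved, stated in full; the proofs are below) =====
def Claim_equal_find_equal_sum : Prop := ∀ (arr : List Int) (n : Int), Dom_find_equal_sum arr n → Pre_find_equal_sum arr n → Spec_find_equal_sum arr n (find_equal_sum arr n)

-- ===== LEMMAS AND PROOFS =====

-- A's loop with the index list replaced by the list of visited VALUES (proof helper)
def pvLoopA' (vals : List Int) (right left : Int) : Bool :=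
  match vals with
  | [] => false
  | v :: rest =>
    if right + v = left - v then true else pvLoopA' rest (right + v) (left - v)

theorem pvLoopA_eq_loopA' (arr2 : List Int) (m : Nat) (hm : m ≤ arr2.length) (r l : Int) :
    pvLoopA arr2 (PySem.List.pyRange ((m : Int) - 1) (-1) (-1)) r l
      = pvLoopA' ((arr2.take m).reverse) r l := by
  induction m generalizing r l with
  | zero => simp [pvLoopA, pvLoopA', PySem.List.pyRange_neg_one_eq_nil]
  | succ k ih =>
    have hk : k < arr2.length := by omega
    have hstep : ((k + 1 : Nat) : Int) - 1 = (k : Int) := by push_cast; ring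
    rw [hstep, PySem.List.pyRange_neg_one_cons (by omega)]
    have htake : (arr2.take (k + 1)).reverse = arr2[k] :: (arr2.take k).reverse := by
      rw [List.take_add_one]
      simp [List.getElem?_eq_getElem hk]
    rw [htake]
    simp only [pvLoopA, pvLoopA']
    have hget : PySem.List.pyGetD arr2 (k : Int) 0 = arr2[k] := by
      rw [PySem.List.pyGetD_natCast]
      simp [List.getElem?_eq_getElem hk]
    rw [hget]
    split
    · rfl
    · exact ih (by omega) _ _

theorem pvLoopA'_char (vals : List Int) (r l : Int) :
    pvLoopA' vals r l
      = decide (∃ j < vals.length, r + ((vals.take (j + 1)).sum) = l - ((vals.take (j + 1)).sum)) := by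
  induction vals generalizing r l with
  | nil => simp [pvLoopA']
  | cons v rest ih =>
    simp only [pvLoopA']
    by_cases h0 : r + v = l - v
    · rw [if_pos h0]
      exact (decide_eq_true ⟨0, by simp, by simpa using h0⟩).symm
    · rw [if_neg h0, ih]
      congr 1
      apply propext
      constructor
      · rintro ⟨j, hj, he⟩
        refine ⟨j + 1, by simpa using hj, ?_⟩
        simp only [List.take_succ_cons, List.sum_cons] at *
        omega
      · rintro ⟨j, hj, he⟩
        cases j with
        | zero => simp at he; omega
        | succ j' =>
          refine ⟨j', by simpa using hj, ?_⟩
          simp only [List.take_succ_cons, List.sum_cons] at he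
          omega

-- the two existentials agree: reversed suffix splits ↔ forward prefix splits
theorem exists_rev_iff_exists_take (pre : List Int) (total : Int) (htot : pre.sum = total) :
    (∃ j < pre.length, (0 : Int) + ((pre.reverse.take (j + 1)).sum) = total - ((pre.reverse.take (j + 1)).sum))
      ↔ (∃ k < pre.length, 2 * ((pre.take k).sum) = total) := by
  have hsum : ∀ k, k ≤ pre.length → ((pre.reverse.take (pre.length - k)).sum) = total - ((pre.take k).sum) := by
    intro k hk
    have h1 : pre.reverse.take (pre.length - k) = (pre.drop (pre.length - (pre.length - k))).reverse :=
      List.take_reverse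
    have h2 : pre.length - (pre.length - k) = k := by omega
    rw [h1, h2, List.sum_reverse]
    have := List.sum_take_add_sum_drop pre k
    omega
  constructor
  · rintro ⟨j, hj, he⟩
    refine ⟨pre.length - (j + 1), by omega, ?_⟩
    have hk : pre.length - (pre.length - (j + 1)) = j + 1 := by omega
    have := hsum (pre.length - (j + 1)) (by omega)
    rw [hk] at this
    omega
  · rintro ⟨k, hk, he⟩
    refine ⟨pre.length - k - 1, by omega, ?_⟩
    have h1 : pre.length - k - 1 + 1 = pre.length - k := by omega
    rw [h1]
    have := hsum k (by omega)
    omega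

-- B's any over range(n) as the forward-prefix existential
theorem any_char (arr2 : List Int) (m : Nat) (total : Int) :
    (PySem.List.pyRange 0 ((m : Int)) 1).any
        (fun k => 2 * (PySem.List.slice arr2 none (some k)).sum == total)
      = decide (∃ k < m, 2 * ((arr2.take k).sum) = total) := by
  rw [Bool.eq_iff_iff, List.any_eq_true, decide_eq_true_eq]
  constructor
  · rintro ⟨i, hi, he⟩
    rw [PySem.List.mem_pyRange_one] at hi
    have hieq : i = ((i.toNat : Nat) : Int) := by omega
    rw [hieq, PySem.List.slice_to_natCast] at he
    exact ⟨i.toNat, by omega, by simpa using he⟩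
  · rintro ⟨k, hk, he⟩
    refine ⟨(k : Int), by rw [PySem.List.mem_pyRange_one]; omega, ?_⟩
    rw [PySem.List.slice_to_natCast]
    simpa using he

-- ===== VERDICT (by name: the statement is the Claim_ definition above) =====
theorem find_equal_sum_spec : Claim_equal_find_equal_sum := by
  intro arr n _ hpre
  unfold Pre_find_equal_sum at hpre
  unfold Spec_find_equal_sum
  simp only [find_equal_sum, find_equal_sum_alt]
  set arr2 := PySem.List.sorted arr (fun x => x) false with harr2
  have hlen : arr2.length = arr.length := PySem.List.length_sorted arr (fun x => x) false
  by_cases hn : 1 < n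
  · set m : Nat := n.toNat with hm
    have hmn : n = (m : Int) := by omega
    have hmlen : m ≤ arr2.length := by omega
    have hslice : PySem.List.slice arr2 none (some n) = arr2.take m := by
      rw [hmn]; exact PySem.List.slice_to_natCast arr2 m
    have htklen : (arr2.take m).length = m := by simp [hmlen]
    have hsum : (PySem.List.pyRange 0 n 1).foldl (fun s i => s + PySem.List.pyGetD arr2 i 0) 0
        = (arr2.take m).sum := by
      have hrange : PySem.List.pyRange 0 n 1 = PySem.List.pyRange 0 ((arr2.take m).length : Int) 1 := by
        rw [htklen, hmn]
      have hcg : (PySem.List.pyRange 0 ((arr2.take m).length : Int) 1).foldl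
            (fun s i => s + PySem.List.pyGetD arr2 i 0) 0
          = (PySem.List.pyRange 0 ((arr2.take m).length : Int) 1).foldl
            (fun s i => s + PySem.List.pyGetD (arr2.take m) i 0) 0 := by
        refine PySem.List.foldl_congr_mem' _ _ _ _ ?_
        intro i hi acc
        rw [PySem.List.mem_pyRange_one, htklen] at hi
        have hieq : i = ((i.toNat : Nat) : Int) := by omega
        rw [hieq, PySem.List.pyGetD_natCast, PySem.List.pyGetD_natCast]
        have hlt : i.toNat < m := by omega
        rw [List.getD_eq_getElem?_getD, List.getD_eq_getElem?_getD,
          List.getElem?_take_of_lt hlt]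
      rw [hrange, hcg, PySem.List.foldl_pyRange_zero_pyGetD' (arr2.take m) 0 (· + ·) 0]
      exact (List.sum_eq_foldl).symm
    rw [hsum, hslice]
    by_cases hmod : PySem.Int.mod ((arr2.take m).sum) 2 = 0
    · rw [if_pos ⟨hn, hmod⟩]
      have hn1 : n - 1 = (m : Int) - 1 := by omega
      rw [hn1, pvLoopA_eq_loopA' arr2 m hmlen, pvLoopA'_char,
        decide_eq_true hn, decide_eq_true hmod, hmn, any_char arr2 m,
        List.length_reverse]
      simp only [Bool.true_and, decide_eq_decide]
      rw [exists_rev_iff_exists_take (arr2.take m) _ rfl, htklen]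
      constructor
      · rintro ⟨k, hk, he⟩
        exact ⟨k, hk, by rwa [List.take_take, min_eq_left hk.le] at he⟩
      · rintro ⟨k, hk, he⟩
        exact ⟨k, hk, by rwa [List.take_take, min_eq_left hk.le]⟩
    · rw [if_neg (fun h => hmod h.2), decide_eq_false hmod]
      simp
  · rw [if_neg (fun h => hn h.1), decide_eq_false hn]
    simp
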